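-- pv_equiv track=rewrite | github.com/xembook/catbuffer-generators | generators/java/Helpers.py | get_attribute_property_equal
-- ===== SOURCE A (Python) =====
-- from enum import Enum
--
-- class TypeDescriptorDisposition(Enum):
--     Inline = 'inline'
--     Const = 'const'
--     Var = 'var'
--     Fill = 'fill'
--
-- def get_attribute_property_equal(schema, attributes, attribute_name, attribute_value, recurse=True):
--     for attribute in attributes:
--         if attribute_name in attribute and attribute[attribute_name] == attribute_value:
--             return attribute
--         if (recurse and 'disposition' in attribute and
--                 attribute['disposition'] == TypeDescriptorDisposition.Inline.value):
--             value = get_attribute_property_equal(schema, schema[attribute['type']]['layout'], attribute_name, attribute_value)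
--             if value is not None:
--                 return value
--     return None
-- ===== SOURCE B (Python) =====
-- def get_attribute_property_equal(schema, attributes, attribute_name, attribute_value, recurse=True):
--     stack = attributes[::-1]
--     while stack:
--         attribute = stack.pop()
--         if attribute_name in attribute and attribute[attribute_name] == attribute_value:
--             return attribute
--         if recurse and attribute.get('disposition') == 'inline':
--             stack.extend(reversed(schema[attribute['type']]['layout']))
--     return None
-- ===== Notes on version B (the rewrite author's own statement) =====
-- stated objective: alternative
-- what changed: The recursive pre-order DFS over inline-referenced layouts is replaced by an iterative while-loop over an explicit stack (top-level attributes reversed; a popped inline attribute's layout is pushed reversed so the subtree is visited before siblings), preserving the exact first-match order without recursion.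
import Mathlib
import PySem

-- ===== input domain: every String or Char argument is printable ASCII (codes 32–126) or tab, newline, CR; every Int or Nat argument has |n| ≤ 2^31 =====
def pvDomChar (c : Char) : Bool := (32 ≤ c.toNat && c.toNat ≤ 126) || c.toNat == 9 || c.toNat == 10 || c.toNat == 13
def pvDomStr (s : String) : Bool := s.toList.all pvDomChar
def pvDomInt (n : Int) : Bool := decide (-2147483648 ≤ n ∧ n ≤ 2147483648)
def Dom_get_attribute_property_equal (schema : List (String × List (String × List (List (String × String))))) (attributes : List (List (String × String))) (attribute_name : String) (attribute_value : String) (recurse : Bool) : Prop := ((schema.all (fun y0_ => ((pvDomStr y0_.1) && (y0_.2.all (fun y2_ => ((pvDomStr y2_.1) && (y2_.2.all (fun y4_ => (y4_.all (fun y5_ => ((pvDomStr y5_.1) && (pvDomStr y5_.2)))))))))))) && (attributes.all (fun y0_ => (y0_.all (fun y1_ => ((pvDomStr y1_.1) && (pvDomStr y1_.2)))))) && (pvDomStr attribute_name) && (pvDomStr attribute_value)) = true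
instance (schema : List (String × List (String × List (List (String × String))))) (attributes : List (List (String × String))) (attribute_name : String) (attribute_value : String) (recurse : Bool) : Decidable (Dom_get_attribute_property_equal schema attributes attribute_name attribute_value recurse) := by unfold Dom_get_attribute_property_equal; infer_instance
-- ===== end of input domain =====

-- B replaces A's recursive pre-order DFS with an iterative explicit-stack loop (same return value, same order).

abbrev pvSchema : Type := List (String × List (String × List (List (String × String))))
abbrev pvAttr : Type := List (String × String)

-- ===== PORT A =====
-- shared helper: Python dict lookup on an association list (first match), i.e. `d[k]` / `k in d`
def pvLookup {ν : Type} (d : List (String × ν)) (k : String) : Option ν :=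
  (d.find? (fun p => p.1 == k)).map (·.2)

-- `schema[attribute['type']]['layout']`; none = KeyError in Python (such inputs are excluded by Pre_)
def pvChild (schema : pvSchema) (a : pvAttr) : Option (List pvAttr) :=
  match pvLookup a "type" with
  | none => none
  | some t =>
    match pvLookup schema t with
    | none => none
    | some e => pvLookup e "layout"

-- A's recursion, step for step; the Nat fuel is only a totality guard for the recursive call
-- (`none` = fuel exhausted or KeyError, never reached under Pre_)
def pvGoA (schema : pvSchema) (name val : String) :
    Nat → List pvAttr → Bool → Option (Option pvAttr)
  | _, [], _ => some none
  | fuel, a :: rest, rec =>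
    if pvLookup a name == some val then some (some a)
    else if rec && (pvLookup a "disposition" == some "inline") then
      match fuel, pvChild schema a with
      | _, none => none
      | 0, some _ => none
      | f + 1, some la =>
        match pvGoA schema name val f la true with
        | none => none
        | some (some v) => some (some v)
        | some none => pvGoA schema name val (f + 1) rest rec
    else pvGoA schema name val fuel rest rec
termination_by fuel attrs _ => (fuel, attrs.length)

def get_attribute_property_equal (schema : List (String × List (String × List (List (String × String))))) (attributes : List (List (String × String))) (attribute_name : String) (attribute_value : String) (recurse : Bool) : Option (List (String × String)) :=
  match pvGoA schema attribute_name attribute_value (schema.length + 1) attributes recurse with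
  | some o => o
  | none => none

-- ===== PORT B =====
-- B's stack loop; the Lean list's head is the stack top (the Python list's END), so Python's
-- `stack.extend(reversed(layout))` followed by later `pop()`s is `layout ++ stack` here.
-- The Nat fuel is only a totality guard (one unit per loop iteration; never exhausted under Pre_).
def pvGoB (schema : pvSchema) (name val : String) (recurse : Bool) :
    Nat → List pvAttr → Option (Option pvAttr)
  | 0, _ => none
  | _ + 1, [] => some none
  | fuel + 1, a :: stack =>
    if pvLookup a name == some val then some (some a)
    else if recurse && (pvLookup a "disposition" == some "inline") then
      match pvChild schema a with
      | none => none
      | some la => pvGoB schema name val recurse fuel (la ++ stack)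
    else pvGoB schema name val recurse fuel stack

def pvLayoutSum (schema : pvSchema) : Nat :=
  (schema.map (fun e => ((pvLookup e.2 "layout").getD []).length)).sum

def pvFuelB (schema : pvSchema) (attributes : List pvAttr) : Nat :=
  attributes.length * (pvLayoutSum schema + 1) ^ (schema.length + 1) + 1

def get_attribute_property_equal_alt (schema : List (String × List (String × List (List (String × String))))) (attributes : List (List (String × String))) (attribute_name : String) (attribute_value : String) (recurse : Bool) : Option (List (String × String)) :=
  match pvGoB schema attribute_name attribute_value recurse (pvFuelB schema attributes) attributes with
  | some o => o
  | none => none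

-- ===== PRECONDITION & SPEC =====
-- pvSafeT schema n t: the inline-reference expansion of schema entry t resolves (entry exists,
-- has a 'layout', every inline attribute in it names a type) to depth n. An expansion that is
-- dangling-free and acyclic along every path reachable from t satisfies this at n = schema.length,
-- since a non-repeating chain of resolvable entries is no longer than the schema itself.
def pvSafeT (schema : pvSchema) : Nat → String → Bool
  | 0, _ => false
  | n + 1, t =>
    match List.find? (fun p => p.1 == t) schema with
    | none => false
    | some pe =>
      match pvLookup pe.2 "layout" with
      | none => false
      | some la => la.all (fun a =>
          !(pvLookup a "disposition" == some "inline") ||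
          (match pvLookup a "type" with
           | none => false
           | some t' => pvSafeT schema n t'))

-- an attribute is admissible at depth n: if it is inline, its 'type' is present and safe at depth n
def pvOkN (schema : pvSchema) (n : Nat) (a : pvAttr) : Bool :=
  !(pvLookup a "disposition" == some "inline") ||
  (match pvLookup a "type" with
   | none => false
   | some t => pvSafeT schema n t)

-- Pre_ excludes (only when recurse is true) inputs whose inline-reference expansion from the given
-- attributes reaches a dangling or cyclic type reference: on those A raises KeyError or recurses
-- forever, except when a matching attribute happens to come before the bad reference in the
-- traversal — whether it is reached depends on the searched name/value, so those few returning
-- inputs are excluded too (see the cited examples). Forward references and unreachable schema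
-- entries are fully admitted.
def Pre_get_attribute_property_equal (schema : List (String × List (String × List (List (String × String))))) (attributes : List (List (String × String))) (attribute_name : String) (attribute_value : String) (recurse : Bool) : Prop :=
  recurse = true → attributes.all (pvOkN schema schema.length) = true
instance (schema : List (String × List (String × List (List (String × String))))) (attributes : List (List (String × String))) (attribute_name : String) (attribute_value : String) (recurse : Bool) : Decidable (Pre_get_attribute_property_equal schema attributes attribute_name attribute_value recurse) := by unfold Pre_get_attribute_property_equal; infer_instance

def pvWitness_get_attribute_property_equal : (List (String × List (String × List (List (String × String))))) × (List (List (String × String))) × String × String × Bool :=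
  ([("T", [("layout", [[("name", "x")]])])], [[("disposition", "inline"), ("type", "T")], [("name", "x")]], "name", "x", true)

def Spec_get_attribute_property_equal (schema : List (String × List (String × List (List (String × String))))) (attributes : List (List (String × String))) (attribute_name : String) (attribute_value : String) (recurse : Bool) (out : Option (List (String × String))) : Prop := out = get_attribute_property_equal_alt schema attributes attribute_name attribute_value recurse
instance (schema : List (String × List (String × List (List (String × String))))) (attributes : List (List (String × String))) (attribute_name : String) (attribute_value : String) (recurse : Bool) (out : Option (List (String × String))) : Decidable (Spec_get_attribute_property_equal schema attributes attribute_name attribute_value recurse out) := by unfold Spec_get_attribute_property_equal; infer_instance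

-- ===== CLAIM (what is proved, stated in full; the proofs are below) =====
def Claim_equal_get_attribute_property_equal : Prop := ∀ (schema : List (String × List (String × List (List (String × String))))) (attributes : List (List (String × String))) (attribute_name : String) (attribute_value : String) (recurse : Bool), Dom_get_attribute_property_equal schema attributes attribute_name attribute_value recurse → Pre_get_attribute_property_equal schema attributes attribute_name attribute_value recurse → Spec_get_attribute_property_equal schema attributes attribute_name attribute_value recurse (get_attribute_property_equal schema attributes attribute_name attribute_value recurse)

-- ===== LEMMAS AND PROOFS =====

-- B's loop is fuel-monotone on successful runs
theorem pvGoB_mono (schema : pvSchema) (name val : String) (recurse : Bool) :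
    ∀ (g g' : Nat) (s : List pvAttr) (p : Option pvAttr),
      pvGoB schema name val recurse g s = some p → g ≤ g' →
      pvGoB schema name val recurse g' s = some p := by
  intro g
  induction g with
  | zero => intro g' s p h _; simp [pvGoB] at h
  | succ g ih =>
    intro g' s p h hle
    obtain ⟨g'', rfl⟩ : ∃ g'', g' = g'' + 1 := ⟨g' - 1, by omega⟩
    cases s with
    | nil => simpa [pvGoB] using h
    | cons a stack =>
      simp only [pvGoB] at h ⊢
      split_ifs at h ⊢ with h1 h2
      · exact h
      · cases hch : pvChild schema a with
        | none => rw [hch] at h; simp at h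
        | some la => rw [hch] at h; exact ih g'' _ _ h (by omega)
      · exact ih g'' _ _ h (by omega)

-- one unfolding step of B's loop (for recurse = true; `true && x` simplified away)
theorem pvGoB_cons_step (schema : pvSchema) (name val : String) (g : Nat)
    (a : pvAttr) (stack : List pvAttr) :
    pvGoB schema name val true (g + 1) (a :: stack) =
      if pvLookup a name == some val then some (some a)
      else if pvLookup a "disposition" == some "inline" then
        match pvChild schema a with
        | none => none
        | some la => pvGoB schema name val true g (la ++ stack)
      else pvGoB schema name val true g stack := by
  simp [pvGoB]

theorem pvGoA_nil (schema : pvSchema) (name val : String) (f : Nat) (rec : Bool) :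
    pvGoA schema name val f [] rec = some none := by
  rw [pvGoA.eq_def]

theorem pvGoA_cons (schema : pvSchema) (name val : String) (fuel : Nat)
    (a : pvAttr) (rest : List pvAttr) (rec : Bool) :
    pvGoA schema name val fuel (a :: rest) rec =
      (if pvLookup a name == some val then some (some a)
      else if rec && (pvLookup a "disposition" == some "inline") then
        match fuel, pvChild schema a with
        | _, none => none
        | 0, some _ => none
        | f + 1, some la =>
          match pvGoA schema name val f la true with
          | none => none
          | some (some v) => some (some v)
          | some none => pvGoA schema name val (f + 1) rest rec
      else pvGoA schema name val fuel rest rec) := by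
  rw [pvGoA.eq_def]

-- unfolding facts for an admissible inline attribute: its type, the entry it resolves to, its
-- layout, and the admissibility of that layout one level down
theorem pvOkN_inline_elim (schema : pvSchema) (n : Nat) (a : pvAttr)
    (hok : pvOkN schema n a = true)
    (hinl : (pvLookup a "disposition" == some "inline") = true) :
    ∃ t m pe la, pvLookup a "type" = some t ∧ n = m + 1 ∧
      List.find? (fun p => p.1 == t) schema = some pe ∧
      pvLookup pe.2 "layout" = some la ∧
      (∀ a' ∈ la, pvOkN schema m a' = true) := by
  unfold pvOkN at hok
  rw [hinl] at hok
  simp only [Bool.not_true, Bool.false_or] at hok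
  cases ht : pvLookup a "type" with
  | none => simp [ht] at hok
  | some t =>
    simp only [ht] at hok
    cases n with
    | zero => simp [pvSafeT] at hok
    | succ m =>
      unfold pvSafeT at hok
      cases hfind : List.find? (fun p => p.1 == t) schema with
      | none => simp [hfind] at hok
      | some pe =>
        simp only [hfind] at hok
        cases hla : pvLookup pe.2 "layout" with
        | none => simp [hla] at hok
        | some la =>
          simp only [hla] at hok
          refine ⟨t, m, pe, la, rfl, rfl, hfind, hla, ?_⟩
          intro a' ha'
          have := List.all_eq_true.mp hok a' ha'
          unfold pvOkN
          simpa using this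

theorem pvLayout_le (schema : pvSchema) (t : String) (pe : String × List (String × List pvAttr))
    (hf : List.find? (fun p => p.1 == t) schema = some pe)
    (la : List pvAttr) (hla : pvLookup pe.2 "layout" = some la) :
    la.length ≤ pvLayoutSum schema := by
  have hmem : pe ∈ schema := List.mem_of_find?_eq_some hf
  have hmap := List.mem_map_of_mem (f := fun e => ((pvLookup e.2 "layout").getD []).length) hmem
  have hle := List.le_sum_of_mem hmap
  simpa [pvLayoutSum, hla] using hle

-- A terminates (returns `some`) with any fuel above the admissibility depth
theorem pvGoA_total (schema : pvSchema) (name val : String) :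
    ∀ (n : Nat) (xs : List pvAttr) (f : Nat), (∀ a ∈ xs, pvOkN schema n a = true) → n < f →
      ∃ o, pvGoA schema name val f xs true = some o := by
  intro n
  induction n using Nat.strong_induction_on with
  | _ n ihn =>
    intro xs
    induction xs with
    | nil => exact fun f _ _ => ⟨none, pvGoA_nil _ _ _ _ _⟩
    | cons a rest ihx =>
      intro f hok hf
      by_cases h1 : (pvLookup a name == some val) = true
      · exact ⟨some a, by rw [pvGoA_cons, if_pos h1]⟩
      · by_cases h2 : (pvLookup a "disposition" == some "inline") = true
        · obtain ⟨t, m, pe, la, ht, hn, hfind, hla, hokla⟩ :=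
            pvOkN_inline_elim schema n a (hok a (by simp)) h2
          have hlk : pvLookup schema t = some pe.2 := by unfold pvLookup; rw [hfind]; rfl
          have hch : pvChild schema a = some la := by simp [pvChild, ht, hlk, hla]
          obtain ⟨f', rfl⟩ : ∃ f', f = f' + 1 := ⟨f - 1, by omega⟩
          obtain ⟨o1, ho1⟩ := ihn m (by omega) la f' hokla (by omega)
          have hokrest : ∀ a' ∈ rest, pvOkN schema n a' = true :=
            fun a' ha' => hok a' (by simp [ha'])
          cases o1 with
          | some v =>
            refine ⟨some v, ?_⟩
            rw [pvGoA_cons, if_neg h1, if_pos (by simp [h2])]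
            simp [hch, ho1]
          | none =>
            obtain ⟨o2, ho2⟩ := ihx (f' + 1) hokrest (by omega)
            refine ⟨o2, ?_⟩
            rw [pvGoA_cons, if_neg h1, if_pos (by simp [h2])]
            simp only [hch, ho1]
            exact ho2
        · have hokrest : ∀ a' ∈ rest, pvOkN schema n a' = true :=
            fun a' ha' => hok a' (by simp [ha'])
          obtain ⟨o2, ho2⟩ := ihx f hokrest hf
          refine ⟨o2, ?_⟩
          rw [pvGoA_cons, if_neg h1, if_neg (by simp [h2])]
          exact ho2

theorem pvGoA_false_total (schema : pvSchema) (name val : String) :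
    ∀ (xs : List pvAttr) (f : Nat), ∃ o, pvGoA schema name val f xs false = some o := by
  intro xs
  induction xs with
  | nil => exact fun f => ⟨none, pvGoA_nil _ _ _ _ _⟩
  | cons a rest ih =>
    intro f
    by_cases h1 : (pvLookup a name == some val) = true
    · exact ⟨some a, by rw [pvGoA_cons, if_pos h1]⟩
    · obtain ⟨o, ho⟩ := ih f
      refine ⟨o, ?_⟩
      rw [pvGoA_cons, if_neg h1, if_neg (by simp)]
      exact ho

-- bridge: a successful run of A on xs prepends to any successful B stack run, with a bounded fuel cost
theorem pvBridge (schema : pvSchema) (name val : String) :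
    ∀ (n : Nat) (xs : List pvAttr) (f : Nat) (o : Option pvAttr),
      (∀ a ∈ xs, pvOkN schema n a = true) →
      pvGoA schema name val f xs true = some o →
      ∃ k, k ≤ xs.length * (pvLayoutSum schema + 1) ^ (n + 1) ∧
        ∀ (ys : List pvAttr) (g : Nat) (p : Option pvAttr),
          pvGoB schema name val true g ys = some p →
          pvGoB schema name val true (g + k) (xs ++ ys) = some (o.or p) := by
  intro n
  induction n using Nat.strong_induction_on with
  | _ n ihn =>
    intro xs
    induction xs with
    | nil =>
      intro f o _ hA
      rw [pvGoA_nil] at hA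
      obtain rfl : (none : Option pvAttr) = o := Option.some.inj hA
      exact ⟨0, by simp, fun ys g p hB => by simpa using hB⟩
    | cons a rest ihx =>
      intro f o hok hA
      rw [pvGoA_cons] at hA
      have hokrest : ∀ a' ∈ rest, pvOkN schema n a' = true :=
        fun a' ha' => hok a' (by simp [ha'])
      by_cases h1 : (pvLookup a name == some val) = true
      · rw [if_pos h1] at hA
        obtain rfl : (some a : Option pvAttr) = o := Option.some.inj hA
        refine ⟨1, ?_, ?_⟩
        · simp only [List.length_cons]
          have h1p : 1 ≤ (pvLayoutSum schema + 1) ^ (n + 1) := Nat.one_le_pow _ _ (by omega)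
          calc 1 ≤ (pvLayoutSum schema + 1) ^ (n + 1) := h1p
            _ ≤ (rest.length + 1) * (pvLayoutSum schema + 1) ^ (n + 1) := by
                exact Nat.le_mul_of_pos_left _ (by omega)
        · intro ys g p hB
          rw [List.cons_append, pvGoB_cons_step, if_pos h1]
          rfl
      · rw [if_neg h1] at hA
        by_cases h2 : (pvLookup a "disposition" == some "inline") = true
        · rw [if_pos (by simp [h2])] at hA
          obtain ⟨t, m, pe, la, ht, hn, hfind, hla, hokla⟩ :=
            pvOkN_inline_elim schema n a (hok a (by simp)) h2
          have hlk : pvLookup schema t = some pe.2 := by unfold pvLookup; rw [hfind]; rfl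
          have hch : pvChild schema a = some la := by simp [pvChild, ht, hlk, hla]
          obtain ⟨f', rfl⟩ : ∃ f', f = f' + 1 := by
            cases f with
            | zero => simp [hch] at hA
            | succ f' => exact ⟨f', rfl⟩
          have hS := pvLayout_le schema t pe hfind la hla
          have hpow : (pvLayoutSum schema + 1) ^ (m + 1) ≤ (pvLayoutSum schema + 1) ^ n :=
            le_of_eq (by rw [hn])
          have h1p : 1 ≤ (pvLayoutSum schema + 1) ^ n := Nat.one_le_pow _ _ (by omega)
          have hsucc : (pvLayoutSum schema + 1) ^ (n + 1)
              = (pvLayoutSum schema + 1) ^ n * (pvLayoutSum schema + 1) := pow_succ _ _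
          cases ho1 : pvGoA schema name val f' la true with
          | none => simp [hch, ho1] at hA
          | some o1 =>
            obtain ⟨k1, hk1, hB1⟩ := ihn m (by omega) la f' o1 hokla ho1
            have hk1' : k1 ≤ pvLayoutSum schema * (pvLayoutSum schema + 1) ^ n :=
              le_trans hk1 (Nat.mul_le_mul hS hpow)
            cases o1 with
            | some v =>
              simp only [hch, ho1] at hA
              obtain rfl : (some v : Option pvAttr) = o := Option.some.inj hA
              obtain ⟨o2, ho2⟩ := pvGoA_total schema name val n rest (n + 1) hokrest (by omega)
              obtain ⟨k2, hk2, hB2⟩ := ihx (n + 1) o2 hokrest ho2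
              refine ⟨1 + k1 + k2, (by
                simp only [List.length_cons]
                have e1 : 1 + pvLayoutSum schema * (pvLayoutSum schema + 1) ^ n
                    ≤ (pvLayoutSum schema + 1) ^ (n + 1) := by
                  rw [hsucc]
                  calc 1 + pvLayoutSum schema * (pvLayoutSum schema + 1) ^ n
                      ≤ (pvLayoutSum schema + 1) ^ n + pvLayoutSum schema * (pvLayoutSum schema + 1) ^ n :=
                        Nat.add_le_add_right h1p _
                    _ = (pvLayoutSum schema + 1) ^ n * (pvLayoutSum schema + 1) := by ring
                calc 1 + k1 + k2
                    ≤ 1 + pvLayoutSum schema * (pvLayoutSum schema + 1) ^ n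
                        + rest.length * (pvLayoutSum schema + 1) ^ (n + 1) :=
                      Nat.add_le_add (Nat.add_le_add_left hk1' 1) hk2
                  _ ≤ (pvLayoutSum schema + 1) ^ (n + 1)
                        + rest.length * (pvLayoutSum schema + 1) ^ (n + 1) :=
                      Nat.add_le_add_right e1 _
                  _ = (rest.length + 1) * (pvLayoutSum schema + 1) ^ (n + 1) := by ring), ?_⟩
              intro ys g p hB
              have t2 := hB2 ys g p hB
              have t1 := hB1 (rest ++ ys) (g + k2) (o2.or p) t2
              rw [show g + (1 + k1 + k2) = (g + k2 + k1) + 1 from by omega,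
                List.cons_append, pvGoB_cons_step, if_neg h1, if_pos h2]
              simp only [hch]
              rw [t1]
              rfl
            | none =>
              simp only [hch, ho1] at hA
              obtain ⟨k2, hk2, hB2⟩ := ihx (f' + 1) o hokrest hA
              refine ⟨1 + k1 + k2, (by
                simp only [List.length_cons]
                have e1 : 1 + pvLayoutSum schema * (pvLayoutSum schema + 1) ^ n
                    ≤ (pvLayoutSum schema + 1) ^ (n + 1) := by
                  rw [hsucc]
                  calc 1 + pvLayoutSum schema * (pvLayoutSum schema + 1) ^ n
                      ≤ (pvLayoutSum schema + 1) ^ n + pvLayoutSum schema * (pvLayoutSum schema + 1) ^ n :=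
                        Nat.add_le_add_right h1p _
                    _ = (pvLayoutSum schema + 1) ^ n * (pvLayoutSum schema + 1) := by ring
                calc 1 + k1 + k2
                    ≤ 1 + pvLayoutSum schema * (pvLayoutSum schema + 1) ^ n
                        + rest.length * (pvLayoutSum schema + 1) ^ (n + 1) :=
                      Nat.add_le_add (Nat.add_le_add_left hk1' 1) hk2
                  _ ≤ (pvLayoutSum schema + 1) ^ (n + 1)
                        + rest.length * (pvLayoutSum schema + 1) ^ (n + 1) :=
                      Nat.add_le_add_right e1 _
                  _ = (rest.length + 1) * (pvLayoutSum schema + 1) ^ (n + 1) := by ring), ?_⟩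
              intro ys g p hB
              have t2 := hB2 ys g p hB
              have t1 := hB1 (rest ++ ys) (g + k2) (o.or p) t2
              rw [show g + (1 + k1 + k2) = (g + k2 + k1) + 1 from by omega,
                List.cons_append, pvGoB_cons_step, if_neg h1, if_pos h2]
              simp only [hch]
              rw [t1]
              rfl
        · rw [if_neg (by simp [h2])] at hA
          obtain ⟨k2, hk2, hB2⟩ := ihx f o hokrest hA
          refine ⟨1 + k2, ?_, ?_⟩
          · simp only [List.length_cons]
            have h1p : 1 ≤ (pvLayoutSum schema + 1) ^ (n + 1) := Nat.one_le_pow _ _ (by omega)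
            calc 1 + k2
                ≤ (pvLayoutSum schema + 1) ^ (n + 1) + rest.length * (pvLayoutSum schema + 1) ^ (n + 1) :=
                  Nat.add_le_add h1p hk2
              _ = (rest.length + 1) * (pvLayoutSum schema + 1) ^ (n + 1) := by ring
          · intro ys g p hB
            have t2 := hB2 ys g p hB
            rw [show g + (1 + k2) = (g + k2) + 1 from by omega,
              List.cons_append, pvGoB_cons_step, if_neg h1, if_neg h2]
            exact t2

theorem pvGoB_false (schema : pvSchema) (name val : String) :
    ∀ (xs : List pvAttr) (f : Nat) (o : Option pvAttr),
      pvGoA schema name val f xs false = some o →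
      pvGoB schema name val false (xs.length + 1) xs = some o := by
  intro xs
  induction xs with
  | nil =>
    intro f o h
    rw [pvGoA_nil] at h
    obtain rfl : (none : Option pvAttr) = o := Option.some.inj h
    rfl
  | cons a rest ih =>
    intro f o h
    rw [pvGoA_cons] at h
    by_cases h1 : (pvLookup a name == some val) = true
    · rw [if_pos h1] at h
      obtain rfl : (some a : Option pvAttr) = o := Option.some.inj h
      rw [List.length_cons, pvGoB, if_pos h1]
    · rw [if_neg h1, if_neg (by simp)] at h
      rw [List.length_cons, pvGoB, if_neg h1, if_neg (by simp)]
      exact ih f o h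

-- ===== VERDICT (by name: the statement is the Claim_ definition above) =====
theorem get_attribute_property_equal_spec : Claim_equal_get_attribute_property_equal := by
  unfold Claim_equal_get_attribute_property_equal
  intro schema attributes name val recurse _ hpre
  unfold Spec_get_attribute_property_equal
  unfold get_attribute_property_equal get_attribute_property_equal_alt
  have hP : 1 ≤ (pvLayoutSum schema + 1) ^ (schema.length + 1) := Nat.one_le_pow _ _ (by omega)
  cases recurse with
  | false =>
    obtain ⟨o, ho⟩ := pvGoA_false_total schema name val attributes (schema.length + 1)
    have hb := pvGoB_false schema name val attributes (schema.length + 1) o ho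
    have hb' := pvGoB_mono schema name val false (attributes.length + 1) (pvFuelB schema attributes)
      attributes o hb (by unfold pvFuelB; nlinarith)
    rw [ho, hb']
  | true =>
    have hall := hpre rfl
    have hok : ∀ a ∈ attributes, pvOkN schema schema.length a = true := List.all_eq_true.mp hall
    obtain ⟨o, ho⟩ := pvGoA_total schema name val schema.length attributes
      (schema.length + 1) hok (by omega)
    obtain ⟨k, hk, hB⟩ := pvBridge schema name val schema.length attributes
      (schema.length + 1) o hok ho
    have hb0 : pvGoB schema name val true 1 [] = some none := rfl
    have hb := hB [] 1 none hb0
    rw [List.append_nil, Option.or_none] at hb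
    have hb' := pvGoB_mono schema name val true (1 + k) (pvFuelB schema attributes)
      attributes o hb (by unfold pvFuelB; omega)
    rw [ho, hb']
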